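-- pv_equiv track=rewrite | github.com/vuhung16au/math-olympiad-ml | rubiks_group_theory/core/permutations.py | rotate_face_clockwise
-- ===== SOURCE A (Python) =====
-- from typing import List
--
-- def identity_permutation() -> List[int]:
--     """Return identity permutation (no change)."""
--     return list(range(54))
--
-- def rotate_face_clockwise(face_start: int) -> List[int]:
--     """Generate permutation for rotating a face clockwise.
--
--     Args:
--         face_start: Starting index of the face (0, 9, 18, 27, 36, or 45)
--
--     Returns:
--         Permutation list for rotating just the face
--     """
--     perm = identity_permutation()
--     # Face rotation: corners and edges cycle
--     # 0->2, 2->8, 8->6, 6->0 (corners)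
--     # 1->5, 5->7, 7->3, 3->1 (edges)
--     # 4 stays (center)
--     corners = [(0, 2), (2, 8), (8, 6), (6, 0)]
--     edges = [(1, 5), (5, 7), (7, 3), (3, 1)]
--
--     for src, dst in corners:
--         perm[face_start + dst] = face_start + src
--     for src, dst in edges:
--         perm[face_start + dst] = face_start + src
--
--     return perm
-- ===== SOURCE B (Python) =====
-- def rotate_face_clockwise(face_start: int) -> list:
--     """Permutation for a clockwise face turn, derived by rotating the 3x3
--     offset grid 90 degrees clockwise (transpose of the reversed rows)."""
--     grid = [[0, 1, 2], [3, 4, 5], [6, 7, 8]]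
--     rotated = list(zip(*grid[::-1]))  # grid turned 90 degrees clockwise
--     perm = list(range(54))
--     for row, rot_row in zip(grid, rotated):
--         for dst, src in zip(row, rot_row):
--             if dst != 4:  # center stays fixed
--                 perm[face_start + dst] = face_start + src
--     return perm
-- ===== Notes on version B (the rewrite author's own statement) =====
-- stated objective: alternative
-- what changed: Derives the cell mapping by rotating the 3x3 offset grid 90 degrees clockwise (zip of the reversed rows) instead of hardcoding the corner and edge 4-cycles.
import Mathlib
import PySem

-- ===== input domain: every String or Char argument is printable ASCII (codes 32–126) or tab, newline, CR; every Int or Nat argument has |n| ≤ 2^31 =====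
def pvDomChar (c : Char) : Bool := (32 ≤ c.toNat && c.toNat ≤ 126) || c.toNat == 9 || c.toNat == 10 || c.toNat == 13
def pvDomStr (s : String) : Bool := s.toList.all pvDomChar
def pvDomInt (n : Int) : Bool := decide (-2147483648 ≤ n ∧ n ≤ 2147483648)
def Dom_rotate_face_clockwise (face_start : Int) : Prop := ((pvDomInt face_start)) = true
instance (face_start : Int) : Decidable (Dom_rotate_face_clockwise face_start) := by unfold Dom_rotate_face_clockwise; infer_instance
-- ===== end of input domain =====

-- ===== PORT A =====
-- B derives the mapping by rotating the 3x3 offset grid instead of hardcoded cycle pair lists; no speed claim.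
def identity_permutation : List Int := (PySem.List.pyRange 0 54 1)

def rotate_face_clockwise (face_start : Int) : List Int :=
  let perm := identity_permutation
  let corners : List (Int × Int) := [(0, 2), (2, 8), (8, 6), (6, 0)]
  let edges : List (Int × Int) := [(1, 5), (5, 7), (7, 3), (3, 1)]
  let perm := corners.foldl (fun p sd => PySem.List.pySetD p (face_start + sd.2) (face_start + sd.1)) perm
  let perm := edges.foldl (fun p sd => PySem.List.pySetD p (face_start + sd.2) (face_start + sd.1)) perm
  perm

-- ===== PORT B =====
-- hand port of Python's zip(*rows): column-wise tupling, stopping at the shortest row (exact)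
def pyZipAux : List Int → List (List Int) → List (List Int)
  | [], _ => []
  | x :: xs, rs =>
    if rs.any (fun l => l.isEmpty) then []
    else (x :: rs.map (fun l => l.headD 0)) :: pyZipAux xs (rs.map (fun l => l.tail))

def pyZipStar : List (List Int) → List (List Int)
  | [] => []
  | r :: rs => pyZipAux r rs

def rotate_face_clockwise_alt (face_start : Int) : List Int :=
  let grid : List (List Int) := [[0, 1, 2], [3, 4, 5], [6, 7, 8]]
  let rotated : List (List Int) := pyZipStar (grid.reverse)
  let perm := (PySem.List.pyRange 0 54 1)
  (grid.zip rotated).foldl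
    (fun p rr =>
      (rr.1.zip rr.2).foldl
        (fun q ds =>
          if ds.1 ≠ 4 then PySem.List.pySetD q (face_start + ds.1) (face_start + ds.2) else q)
        p)
    perm

-- ===== PRECONDITION & SPEC =====
-- Pre_ excludes exactly the inputs where A raises IndexError (some written index out of [-54,53]).
def Pre_rotate_face_clockwise (face_start : Int) : Prop := -54 ≤ face_start ∧ face_start ≤ 45
instance (face_start : Int) : Decidable (Pre_rotate_face_clockwise face_start) := by unfold Pre_rotate_face_clockwise; infer_instance
def pvWitness_rotate_face_clockwise : Int := (9)

def Spec_rotate_face_clockwise (face_start : Int) (out : List Int) : Prop := out = rotate_face_clockwise_alt face_start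
instance (face_start : Int) (out : List Int) : Decidable (Spec_rotate_face_clockwise face_start out) := by unfold Spec_rotate_face_clockwise; infer_instance

-- ===== CLAIM (what is proved, stated in full; the proofs are below) =====
def Claim_equal_rotate_face_clockwise : Prop := ∀ (face_start : Int), Dom_rotate_face_clockwise face_start → Pre_rotate_face_clockwise face_start → Spec_rotate_face_clockwise face_start (rotate_face_clockwise face_start)

-- ===== LEMMAS AND PROOFS =====
-- finite check: both ports agree on each of the 100 admissible inputs
set_option maxRecDepth 8192 in
theorem rfc_all_k : ∀ k : Fin 100, rotate_face_clockwise ((k : Int) - 54) = rotate_face_clockwise_alt ((k : Int) - 54) := by decide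

-- ===== VERDICT (by name: the statement is the Claim_ definition above) =====
theorem rotate_face_clockwise_spec : Claim_equal_rotate_face_clockwise := by
  intro fs _ hpre
  obtain ⟨h1, h2⟩ := hpre
  have hk : (fs + 54).toNat < 100 := by omega
  have := rfc_all_k ⟨(fs + 54).toNat, hk⟩
  have he : (((fs + 54).toNat : Int)) = fs + 54 := Int.toNat_of_nonneg (by omega)
  rw [he] at this
  simpa [Spec_rotate_face_clockwise] using this
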